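-- pv_equiv track=rewrite | github.com/noahkelly2024/moodboard-app | python-backend/wayfair.py | _choose_from_srcset
-- ===== SOURCE A (Python) =====
-- def _choose_from_srcset(srcset: str, target: int = 400) -> str | None:
--     if not srcset:
--         return None
--     candidates: list[tuple[int, str]] = []
--     for part in srcset.split(','):
--         token = part.strip()
--         if not token:
--             continue
--         segs = token.split()
--         if not segs:
--             continue
--         url = segs[0]
--         width = None
--         for s in segs[1:]:
--             if s.endswith('w'):
--                 try:
--                     width = int(s[:-1])
--                 except Exception:
--                     width = None
--         candidates.append(((width or 0), url))
--     if not candidates: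
--         return None
--     candidates.sort(key=lambda x: x[0])
--     # Pick the smallest candidate >= target; otherwise pick the largest available
--     for w, u in candidates:
--         if w >= target:
--             return u
--     return candidates[-1][1]
-- ===== SOURCE B (Python) =====
-- def _choose_from_srcset(srcset: str, target: int = 400) -> str | None:
--     if not srcset:
--         return None
--     best = None       # (width, url) with smallest width >= target; earliest index wins ties
--     fallback = None   # (width, url) with maximum width; latest index wins ties
--     for part in srcset.split(','):
--         token = part.strip()
--         if not token:
--             continue
--         segs = token.split()
--         if not segs:
--             continue
--         url = segs[0]
--         width = None
--         for s in segs[1:]: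
--             if s.endswith('w'):
--                 try:
--                     width = int(s[:-1])
--                 except Exception:
--                     width = None
--         w = width or 0
--         if w >= target and (best is None or w < best[0]):
--             best = (w, url)
--         if fallback is None or w >= fallback[0]:
--             fallback = (w, url)
--     if best is not None:
--         return best[1]
--     if fallback is not None:
--         return fallback[1]
--     return None
-- ===== Notes on version B (the rewrite author's own statement) =====
-- stated objective: simpler
-- what changed: Replaces A's sort-then-scan (stable sort by width, first width >= target, else last) with a single unsorted pass that keeps the best qualifying candidate (smallest width >= target, earliest wins ties) and a max-width fallback (latest wins ties).
import Mathlib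
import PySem

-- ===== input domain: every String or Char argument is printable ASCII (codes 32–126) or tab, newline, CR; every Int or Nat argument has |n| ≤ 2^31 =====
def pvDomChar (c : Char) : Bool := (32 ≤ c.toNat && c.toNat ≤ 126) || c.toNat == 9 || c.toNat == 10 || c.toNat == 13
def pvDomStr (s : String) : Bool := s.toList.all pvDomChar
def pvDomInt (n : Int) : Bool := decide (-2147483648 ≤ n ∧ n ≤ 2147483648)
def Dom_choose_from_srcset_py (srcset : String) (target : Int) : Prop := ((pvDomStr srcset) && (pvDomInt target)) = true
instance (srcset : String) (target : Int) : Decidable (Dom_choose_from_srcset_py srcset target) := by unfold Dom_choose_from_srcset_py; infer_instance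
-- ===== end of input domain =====

-- B replaces A's "sort candidates, scan for the first width ≥ target, else take the last"
-- with a single unsorted pass keeping the best qualifying candidate and a max-width fallback (simpler, no sort).

-- shared parsing (the loop body both Pythons share textually): one srcset part → optional (width, url)
def pvParseWidth (segs : List String) : Option Int :=
  segs.foldl (fun w s =>
    if PySem.Str.endswith s "w" then PySem.Int.ofStr? (PySem.Str.slice s none (some (-1)))
    else w) none

def pvPartCand (part : String) : Option (Int × String) :=
  let token := PySem.Str.strip part
  if token = "" then none
  else
    match PySem.Str.split₀ token with
    | [] => none
    | url :: rest => some ((pvParseWidth rest).getD 0, url)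

-- ===== PORT A =====
def pvScanA (target : Int) : List (Int × String) → Option String
  | [] => none
  | (w, u) :: rest => if target ≤ w then some u else pvScanA target rest

def choose_from_srcset_py (srcset : String) (target : Int) : Option String :=
  if srcset = "" then none
  else
    let parts := (PySem.Str.split? srcset ",").getD []
    let candidates := parts.foldl (fun acc part =>
      match pvPartCand part with
      | none => acc
      | some c => acc ++ [c]) []
    if candidates = [] then none
    else
      let sortedC := PySem.List.sorted candidates (fun x => x.1)
      match pvScanA target sortedC with
      | some u => some u
      | none => (PySem.List.pyGet? sortedC (-1)).map (fun c => c.2)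

-- ===== PORT B =====
def pvStepB (target : Int) (st : Option (Int × String) × Option (Int × String)) (c : Int × String) :
    Option (Int × String) × Option (Int × String) :=
  let best := st.1
  let fb := st.2
  let best' := match best with
    | none => if target ≤ c.1 then some c else best
    | some b => if target ≤ c.1 ∧ c.1 < b.1 then some c else best
  let fb' := match fb with
    | none => some c
    | some f => if f.1 ≤ c.1 then some c else fb
  (best', fb')

def pvStepBPart (target : Int) (st : Option (Int × String) × Option (Int × String)) (part : String) :
    Option (Int × String) × Option (Int × String) :=
  match pvPartCand part with
  | none => st
  | some c => pvStepB target st c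

def choose_from_srcset_py_alt (srcset : String) (target : Int) : Option String :=
  if srcset = "" then none
  else
    let parts := (PySem.Str.split? srcset ",").getD []
    let st := parts.foldl (pvStepBPart target) (none, none)
    match st.1 with
    | some b => some b.2
    | none =>
      match st.2 with
      | some f => some f.2
      | none => none

-- ===== PRECONDITION & SPEC =====
def Spec_choose_from_srcset_py (srcset : String) (target : Int) (out : Option String) : Prop := out = choose_from_srcset_py_alt srcset target
instance (srcset : String) (target : Int) (out : Option String) : Decidable (Spec_choose_from_srcset_py srcset target out) := by unfold Spec_choose_from_srcset_py; infer_instance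

-- ===== CLAIM (what is proved, stated in full; the proofs are below) =====
def Claim_equal_choose_from_srcset_py : Prop := ∀ (srcset : String) (target : Int), Dom_choose_from_srcset_py srcset target → Spec_choose_from_srcset_py srcset target (choose_from_srcset_py srcset target)

-- ===== LEMMAS AND PROOFS =====

-- first candidate with width ≥ target (the pair version of A's scan)
def pvFirstQual (target : Int) : List (Int × String) → Option (Int × String)
  | [] => none
  | c :: rest => if target ≤ c.1 then some c else pvFirstQual target rest

theorem pvScanA_eq_firstQual (t : Int) (s : List (Int × String)) :
    pvScanA t s = (pvFirstQual t s).map (fun c => c.2) := by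
  induction s with
  | nil => rfl
  | cons c rest ih =>
    obtain ⟨w, u⟩ := c
    simp only [pvScanA, pvFirstQual]
    split_ifs <;> simp [ih]

-- collecting candidates via append-fold = the direct recursive list
def pvCandList : List String → List (Int × String)
  | [] => []
  | p :: ps =>
    match pvPartCand p with
    | none => pvCandList ps
    | some c => c :: pvCandList ps

theorem candidates_foldl_eq (parts : List String) (acc : List (Int × String)) :
    parts.foldl (fun acc part =>
      match pvPartCand part with
      | none => acc
      | some c => acc ++ [c]) acc = acc ++ pvCandList parts := by
  induction parts generalizing acc with
  | nil => simp [pvCandList]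
  | cons p ps ih =>
    simp only [List.foldl_cons, pvCandList]
    cases pvPartCand p <;> simp [ih]

theorem foldB_parts_eq (t : Int) (parts : List String) (st : Option (Int × String) × Option (Int × String)) :
    parts.foldl (pvStepBPart t) st = (pvCandList parts).foldl (pvStepB t) st := by
  induction parts generalizing st with
  | nil => rfl
  | cons p ps ih =>
    simp only [List.foldl_cons, pvStepBPart, pvCandList]
    cases pvPartCand p <;> simp [ih]

-- abbreviation for A's insertion function (the one sorted_eq_foldl_insertBy names)
def pvIns (c : Int × String) (s : List (Int × String)) : List (Int × String) :=
  PySem.List.insertBy (fun a b => decide (a.1 < b.1)) c s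

theorem pairwise_insertBy (c : Int × String) (s : List (Int × String))
    (hs : s.Pairwise (fun a b => a.1 ≤ b.1)) :
    (pvIns c s).Pairwise (fun a b => a.1 ≤ b.1) := by
  induction s with
  | nil => simp [pvIns, PySem.List.insertBy]
  | cons y ys ih =>
    rcases List.pairwise_cons.mp hs with ⟨hy, hys⟩
    simp only [pvIns, PySem.List.insertBy]
    by_cases h : c.1 < y.1
    · simp only [h, decide_true, if_true]
      refine List.pairwise_cons.mpr ⟨?_, hs⟩
      intro b hb
      rcases List.mem_cons.mp hb with hb | hb
      · subst hb; omega
      · have := hy b hb; omega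
    · simp only [h, decide_false, Bool.false_eq_true, if_false]
      refine List.pairwise_cons.mpr ⟨?_, ih hys⟩
      intro b hb
      have hb' := (PySem.List.mem_insertBy (before := fun a b => decide (a.1 < b.1)) (x := c) (ys := ys) (y := b)).mp hb
      rcases hb' with hb' | hb'
      · subst hb'; omega
      · exact hy b hb'

theorem firstQual_mem_ge (t : Int) (s : List (Int × String)) (b : Int × String)
    (h : pvFirstQual t s = some b) : b ∈ s ∧ t ≤ b.1 := by
  induction s with
  | nil => simp [pvFirstQual] at h
  | cons y ys ih =>
    simp only [pvFirstQual] at h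
    by_cases hy : t ≤ y.1
    · simp only [hy, if_true, Option.some.injEq] at h
      subst h; exact ⟨List.mem_cons_self, hy⟩
    · simp only [hy, if_false] at h
      rcases ih h with ⟨hm, hge⟩
      exact ⟨List.mem_cons_of_mem _ hm, hge⟩

theorem firstQual_insertBy (t : Int) (c : Int × String) (s : List (Int × String))
    (hs : s.Pairwise (fun a b => a.1 ≤ b.1)) :
    pvFirstQual t (pvIns c s) =
      match pvFirstQual t s with
      | none => if t ≤ c.1 then some c else none
      | some b => if t ≤ c.1 ∧ c.1 < b.1 then some c else some b := by
  induction s with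
  | nil =>
    simp only [pvIns, PySem.List.insertBy, pvFirstQual]
  | cons y ys ih =>
    rcases List.pairwise_cons.mp hs with ⟨hy, hys⟩
    simp only [pvIns, PySem.List.insertBy]
    by_cases hlt : c.1 < y.1
    · simp only [hlt, decide_true, if_true]
      by_cases hc : t ≤ c.1
      · -- c qualifies and is first: every qualifying element of y::ys has width > c.1
        cases hq : pvFirstQual t (y :: ys) with
        | none => simp [pvFirstQual, hc]
        | some b =>
          rcases firstQual_mem_ge t (y :: ys) b hq with ⟨hm, _⟩
          have hb : c.1 < b.1 := by
            rcases List.mem_cons.mp hm with hm | hm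
            · rw [hm]; exact hlt
            · have := hy b hm; omega
          simp [pvFirstQual, hc, hb]
      · have hct : ¬ (t ≤ c.1) := hc
        simp only [pvFirstQual, hct, if_false]
        cases hq : pvFirstQual t (y :: ys) with
        | none => simp [pvFirstQual] at hq; simp [hq]
        | some b => simp [pvFirstQual] at hq ⊢; simp [hq]
      -- end hlt true
    · simp only [hlt, decide_false, Bool.false_eq_true, if_false]
      by_cases hyq : t ≤ y.1
      · have hnc : ¬ (t ≤ c.1 ∧ c.1 < y.1) := by omega
        simp [pvFirstQual, hyq, hnc]
      · simp only [pvFirstQual, hyq, if_false]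
        exact ih hys

theorem getLast?_insertBy (c : Int × String) (s : List (Int × String))
    (hs : s.Pairwise (fun a b => a.1 ≤ b.1)) :
    (pvIns c s).getLast? =
      match s.getLast? with
      | none => some c
      | some f => if f.1 ≤ c.1 then some c else some f := by
  induction s with
  | nil => simp [pvIns, PySem.List.insertBy]
  | cons y ys ih =>
    rcases List.pairwise_cons.mp hs with ⟨hy, hys⟩
    simp only [pvIns, PySem.List.insertBy]
    by_cases hlt : c.1 < y.1
    · simp only [hlt, decide_true, if_true]
      cases hlast : (y :: ys).getLast? with
      | none => simp at hlast
      | some f =>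
        have hf : f ∈ y :: ys := List.mem_of_getLast? hlast
        have hyf : y.1 ≤ f.1 := by
          rcases List.mem_cons.mp hf with hm | hm
          · rw [hm]
          · exact hy f hm
        have hnf : ¬ f.1 ≤ c.1 := by omega
        rw [List.getLast?_cons_cons, hlast]
        simp [hnf]
    · simp only [hlt, decide_false, Bool.false_eq_true, if_false]
      have hins : (y :: PySem.List.insertBy (fun a b => decide (a.1 < b.1)) c ys).getLast? =
          (pvIns c ys).getLast? := by
        cases hI : pvIns c ys with
        | nil =>
          exfalso
          cases ys with
          | nil => simp [pvIns, PySem.List.insertBy] at hI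
          | cons z zs =>
            simp only [pvIns, PySem.List.insertBy] at hI
            split_ifs at hI
        | cons a as =>
          have : PySem.List.insertBy (fun a b => decide (a.1 < b.1)) c ys = a :: as := hI
          rw [this, List.getLast?_cons_cons, ← hI]
      rw [hins, ih hys]
      cases ys with
      | nil => simp_all
      | cons z zs => rw [List.getLast?_cons_cons]

-- main invariant: folding B's step over cs, starting from the state describing sorted prefix s,
-- lands in the state describing the full insertion-sorted list
theorem foldB_inv (t : Int) (cs : List (Int × String)) :
    ∀ (s : List (Int × String)), s.Pairwise (fun a b => a.1 ≤ b.1) →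
    cs.foldl (pvStepB t) (pvFirstQual t s, s.getLast?) =
      (pvFirstQual t (cs.foldl (fun a x => pvIns x a) s),
       (cs.foldl (fun a x => pvIns x a) s).getLast?) := by
  induction cs with
  | nil => intro s _; rfl
  | cons c rest ih =>
    intro s hs
    simp only [List.foldl_cons]
    have hstep : pvStepB t (pvFirstQual t s, s.getLast?) c =
        (pvFirstQual t (pvIns c s), (pvIns c s).getLast?) := by
      rw [firstQual_insertBy t c s hs, getLast?_insertBy c s hs]
      cases hq : pvFirstQual t s <;> cases hl : s.getLast? <;>
        simp [pvStepB]
    rw [hstep]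
    exact ih (pvIns c s) (pairwise_insertBy c s hs)

theorem pyGet_neg_one_getLast? (s : List (Int × String)) (h : s ≠ []) :
    PySem.List.pyGet? s (-1) = s.getLast? := by
  simp only [PySem.List.pyGet?, PySem.List.pyIdx?]
  have hlen : 0 < s.length := List.length_pos_iff.mpr h
  have h1 : ¬ ((0 : Int) ≤ -1) := by omega
  have h2 : (-(s.length : Int) ≤ -1) := by omega
  simp only [h1, if_false, h2, if_true, Option.bind]
  have : s.length - ((1 : Int)).toNat = s.length - 1 := by norm_num
  rw [List.getLast?_eq_getElem?]
  norm_num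

-- ===== VERDICT (by name: the statement is the Claim_ definition above) =====
theorem choose_from_srcset_py_spec : Claim_equal_choose_from_srcset_py := by
  intro srcset target _
  unfold Spec_choose_from_srcset_py choose_from_srcset_py choose_from_srcset_py_alt
  by_cases hempty : srcset = ""
  · simp [hempty]
  · simp only [hempty, if_false]
    set parts := (PySem.Str.split? srcset ",").getD [] with hparts
    rw [candidates_foldl_eq parts [], List.nil_append]
    rw [foldB_parts_eq target parts (none, none)]
    set cs := pvCandList parts with hcs
    by_cases hnil : cs = []
    · simp [hnil]
    · simp only [hnil, if_false]
      have hfold := foldB_inv target cs [] (by simp)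
      simp only [pvFirstQual, List.getLast?_nil] at hfold
      rw [hfold]
      have hsorted : PySem.List.sorted cs (fun x => x.1) =
          cs.foldl (fun a x => pvIns x a) [] := by
        rw [PySem.List.sorted_eq_foldl_insertBy]
        rfl
      set S := cs.foldl (fun a x => pvIns x a) [] with hS
      rw [← hsorted]
      have hSne : (PySem.List.sorted cs (fun x => x.1)) ≠ [] := fun hE =>
        hnil ((PySem.List.sorted_eq_nil_iff cs (fun x => x.1) false).mp hE)
      rw [pvScanA_eq_firstQual, pyGet_neg_one_getLast? _ hSne]
      cases hq : pvFirstQual target (PySem.List.sorted cs (fun x => x.1)) with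
      | some b => simp
      | none =>
        simp only [Option.map_none]
        cases hl : (PySem.List.sorted cs (fun x => x.1)).getLast? with
        | none => exact absurd (by simpa using hl) hSne
        | some f => simp
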